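-- pv_equiv track=rewrite | github.com/yue125/badou-jingpingban | 119-蒲睿/week4/full_cut.py | all_splits
-- ===== SOURCE A (Python) =====
-- def all_splits(sentence):
--     if not sentence:
--         return [[]]
--     result = []
--     for i in range(1, 3):
--         current_word = sentence[:i]
--         remaining_sentence = sentence[i:]
--         remaining_split = all_splits(remaining_sentence)
--         for split in remaining_split:
--             result.append([current_word] + split)
--     return result
-- ===== SOURCE B (Python) =====
-- def all_splits(sentence):
--     n = len(sentence)
--     # dp[j] = all splits of the suffix starting at position j, built back to front
--     dp = [None] * (n + 1)
--     dp[n] = [[]]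
--     for j in range(n - 1, -1, -1):
--         entry = []
--         for i in (1, 2):
--             word = sentence[j:j + i]
--             # continue from wherever the slice actually ended
--             for tail in dp[j + len(word)]:
--                 entry.append([word] + tail)
--         dp[j] = entry
--     return dp[0]
-- ===== Notes on version B (the rewrite author's own statement) =====
-- stated objective: alternative
-- what changed: Replaces the branching recursion (which re-enumerates each suffix's splits once per caller) by a bottom-up DP array indexed by suffix start; each entry extends the splits stored at the position where the taken slice ends, so every suffix's split list is computed exactly once.
import Mathlib
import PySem

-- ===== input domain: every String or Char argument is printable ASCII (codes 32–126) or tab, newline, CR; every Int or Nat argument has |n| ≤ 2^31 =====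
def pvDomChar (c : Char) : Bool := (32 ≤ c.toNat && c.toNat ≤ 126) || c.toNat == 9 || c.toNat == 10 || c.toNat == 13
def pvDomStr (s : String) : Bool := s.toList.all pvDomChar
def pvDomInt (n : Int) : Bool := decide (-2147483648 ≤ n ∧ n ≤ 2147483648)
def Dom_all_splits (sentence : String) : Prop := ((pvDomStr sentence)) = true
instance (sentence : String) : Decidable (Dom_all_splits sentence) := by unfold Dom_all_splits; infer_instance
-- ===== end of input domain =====

-- ===== PORT A =====
-- B is a bottom-up DP over suffix start positions; A is the original branching recursion. Return-value equivalence.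
-- A, transliterated on the character list: take i / drop i are Python's clamped slices sentence[:i] / sentence[i:].
def allSplitsA : List Char → List (List String)
  | [] => [[]]
  | c :: rest =>
      -- i = 1: current_word = sentence[:1], remaining = sentence[1:]
      ((allSplitsA rest).map (fun split => String.ofList [c] :: split)) ++
      -- i = 2: current_word = sentence[:2], remaining = sentence[2:]
      ((allSplitsA (rest.drop 1)).map (fun split => String.ofList (c :: rest.take 1) :: split))
  termination_by l => l.length
  decreasing_by
    all_goals simp

def all_splits (sentence : String) : List (List String) := allSplitsA sentence.toList

-- ===== PORT B =====
-- B's dp array [dp[j], dp[j+1], …, dp[n]], built back-to-front; each entry continues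
-- from dp[j + len(word)], i.e. from where the taken slice actually ended.
def allSplitsDP : List Char → List (List (List String))
  | [] => [[[]]]
  | c :: rest =>
      let dps := allSplitsDP rest            -- dp[j+1 .. n]
      let w1 : List Char := [c]              -- sentence[j:j+1]
      let w2 : List Char := c :: rest.take 1 -- sentence[j:j+2]
      (((dps.getD (w1.length - 1) [[]]).map (fun t => String.ofList w1 :: t)) ++
       ((dps.getD (w2.length - 1) [[]]).map (fun t => String.ofList w2 :: t))) :: dps

def all_splits_alt (sentence : String) : List (List String) :=
  (allSplitsDP sentence.toList).headD [[]]

-- ===== PRECONDITION & SPEC =====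
def Spec_all_splits (sentence : String) (out : List (List String)) : Prop := out = all_splits_alt sentence
instance (sentence : String) (out : List (List String)) : Decidable (Spec_all_splits sentence out) := by unfold Spec_all_splits; infer_instance

-- ===== CLAIM =====
def Claim_equal_all_splits : Prop := ∀ (sentence : String), Dom_all_splits sentence → Spec_all_splits sentence (all_splits sentence)

-- ===== LEMMAS AND PROOFS =====
theorem headD_map_tails (x : List (List String)) (r : List Char) :
    ((r.tails.map allSplitsA).headD x) = allSplitsA r := by
  cases r <;> simp

-- The DP list is exactly allSplitsA applied to every suffix.
theorem allSplitsDP_eq_tails (l : List Char) :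
    allSplitsDP l = l.tails.map allSplitsA := by
  induction l with
  | nil => simp [allSplitsDP, allSplitsA]
  | cons c rest ih =>
      rw [allSplitsDP, ih]
      cases rest with
      | nil => simp [allSplitsA]
      | cons d r =>
          simp only [List.tails_cons, List.map_cons, List.take, List.length_cons,
            List.length_nil, List.getD_cons_succ]
          conv_rhs => rw [allSplitsA]
          cases r <;> simp <;> simp [headD_map_tails]

-- ===== VERDICT =====
theorem all_splits_spec : Claim_equal_all_splits := by
  intro sentence _
  unfold Spec_all_splits all_splits all_splits_alt
  rw [allSplitsDP_eq_tails, headD_map_tails]
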